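-- pv_equiv track=rewrite | github.com/nexterot/tismenetsky-dlu-decomposition | main.py | eliminate_n_max
-- ===== SOURCE A (Python) =====
-- def eliminate_n_max(arr, n):
--     m = dict()
--     for i in range(len(arr)):
--         ind = arr[i]
--         l = m.get(arr[i], [])
--         l.append(i)
--         m[ind] = l
--     for key in sorted(m.keys(), key=lambda x: abs(x)):
--         indexes = m[key]
--         for i in indexes:
--             if n == 0:
--                 break
--             arr[i] = 0
--             n -= 1
--     return arr
-- ===== SOURCE B (Python) =====
-- def eliminate_n_max(arr, n):
--     first = {}
--     for i, v in enumerate(arr):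
--         first.setdefault(v, i)
--     order = sorted(range(len(arr)), key=lambda i: (abs(arr[i]), first[arr[i]], i))
--     for i in order:
--         if n == 0:
--             break
--         arr[i] = 0
--         n -= 1
--     return arr
-- ===== Notes on version B (the rewrite author's own statement) =====
-- stated objective: simpler
-- what changed: A groups indices into a dict of per-value lists, stably sorts the distinct values by abs and zeroes with two nested loops; B records only each value's first-occurrence index, sorts the index list once under the explicit key (abs(arr[i]), first[arr[i]], i) and zeroes in a single flat pass.
import Mathlib
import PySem

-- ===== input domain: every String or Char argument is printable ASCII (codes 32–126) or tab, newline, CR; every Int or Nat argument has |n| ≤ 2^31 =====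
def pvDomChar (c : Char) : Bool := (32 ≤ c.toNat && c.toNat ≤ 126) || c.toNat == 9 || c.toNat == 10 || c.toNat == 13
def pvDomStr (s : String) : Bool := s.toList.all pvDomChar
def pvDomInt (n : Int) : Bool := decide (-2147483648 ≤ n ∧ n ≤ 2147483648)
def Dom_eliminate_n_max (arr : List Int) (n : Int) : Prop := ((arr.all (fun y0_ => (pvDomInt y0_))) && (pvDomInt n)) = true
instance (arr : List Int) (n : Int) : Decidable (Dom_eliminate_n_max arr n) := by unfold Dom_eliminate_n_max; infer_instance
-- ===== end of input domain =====

-- B replaces A's group-by-value dict + stable sort of the keys + nested zeroing loops by one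
-- sort of the index list under the explicit key (|arr[i]|, first occurrence of arr[i], i) and a
-- single flat zeroing pass (objective: simpler, same O(L log L) cost).  Both the Python A and the
-- Python B mutate `arr` in place and return it; the equivalence proved here is about the return value.

-- ===== PORT A =====
-- the inner 'for i in indexes: if n == 0: break; arr[i] = 0; n -= 1' loop, state (arr, n);
-- arr[i] = 0 is pySetD (exact here: every stored index is in range)
def pvAZero : List Int → List Int × Int → List Int × Int
  | [], st => st
  | i :: rest, (a, n) => if n = 0 then (a, n) else pvAZero rest (PySem.List.pySetD a i 0, n - 1)

-- first loop of A: m[arr[i]] grows the index list (m.get(arr[i], []) ++ [i])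
def pvAGroup (arr : List Int) : PySem.Dict Int (List Int) :=
  (PySem.List.pyRange 0 (arr.length : Int) 1).foldl (fun m i =>
    let ind := (PySem.List.pyGet? arr i).getD 0   -- arr[i]; i from range(len(arr)) is always in range
    let l := m.getD ind []
    m.insert ind (l ++ [i])) PySem.Dict.empty

def eliminate_n_max (arr : List Int) (n : Int) : List Int :=
  let m := pvAGroup arr
  let st := (PySem.List.sorted m.keys (fun x => |x|) false).foldl
      (fun st key => pvAZero ((m.get? key).getD []) st) (arr, n)
  st.1

-- ===== PORT B =====
-- B's 'first.setdefault(v, i)' loop over enumerate(arr)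
def pvBFirst (arr : List Int) : PySem.Dict Int Int :=
  (PySem.List.enumerate arr 0).foldl (fun d p => d.setdefault p.2 p.1) PySem.Dict.empty

-- B's sorted(range(len(arr)), key=lambda i: (abs(arr[i]), first[arr[i]], i)): the 3-tuple key is
-- ported with sorted2, its (first[arr[i]], i) tail as one lexicographic pair — exact
def pvBOrder (arr : List Int) : List Int :=
  PySem.List.sorted2 (PySem.List.pyRange 0 (arr.length : Int) 1)
    (fun i => |(PySem.List.pyGet? arr i).getD 0|)
    (fun i => toLex (((pvBFirst arr).getD ((PySem.List.pyGet? arr i).getD 0) 0), i)) false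

-- B's final 'for i in order: if n == 0: break; arr[i] = 0; n -= 1'
def pvBZero : List Int → List Int → Int → List Int
  | [], a, _ => a
  | i :: rest, a, n => if n = 0 then a else pvBZero rest (PySem.List.pySetD a i 0) (n - 1)

def eliminate_n_max_alt (arr : List Int) (n : Int) : List Int :=
  pvBZero (pvBOrder arr) arr n

-- ===== PRECONDITION & SPEC =====
def Spec_eliminate_n_max (arr : List Int) (n : Int) (out : List Int) : Prop := out = eliminate_n_max_alt arr n
instance (arr : List Int) (n : Int) (out : List Int) : Decidable (Spec_eliminate_n_max arr n out) := by unfold Spec_eliminate_n_max; infer_instance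

-- ===== CLAIM (what is proved, stated in full; the proofs are below) =====
def Claim_equal_eliminate_n_max : Prop := ∀ (arr : List Int) (n : Int), Dom_eliminate_n_max arr n → Spec_eliminate_n_max arr n (eliminate_n_max arr n)

-- ===== LEMMAS AND PROOFS =====

-- abbreviations used only by the proofs
def pvGet (arr : List Int) (i : Int) : Int := (PySem.List.pyGet? arr i).getD 0
def pvIdxs (arr : List Int) : List Int := PySem.List.pyRange 0 (arr.length : Int) 1
def pvF (arr : List Int) (v : Int) : Int := (pvBFirst arr).getD v 0
-- the common visiting order: A's sorted keys, each expanded to its index group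
def pvYs (arr : List Int) : List Int :=
  (PySem.List.sorted (pvAGroup arr).keys (fun x => |x|) false).flatMap
    (fun v => (pvIdxs arr).filter (fun i => pvGet arr i == v))





-- pvBFirst: keys and strictly increasing stored indices



-- insertion-sort stability: if the tie-breaker g strictly increases along the input,
-- the sorted output is pairwise strictly (k, g)-lexicographically increasing


-- sorted2 with keys k1, k2 is sorted with the lexicographic pair key




-- loop plumbing




theorem pvGet_map (arr : List Int) : (pvIdxs arr).map (pvGet arr) = arr := by
  apply List.ext_getElem
  · simp [pvIdxs, PySem.List.length_pyRange_one]
  · intro k h1 h2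
    simp only [pvIdxs, List.getElem_map]
    rw [PySem.List.getElem_pyRange_one]
    simp only [pvGet, zero_add]
    rw [PySem.List.pyGet?_natCast]
    simp [List.getElem?_eq_getElem h2]

theorem pvAGroup_keys (arr : List Int) : (pvAGroup arr).keys = PySem.Set.ofList arr := by
  have h := PySem.Dict.keys_foldl_insert_key (pvIdxs arr) (pvGet arr)
      (fun m i => m.getD (pvGet arr i) [] ++ [i]) PySem.Dict.empty
  rw [pvGet_map] at h
  exact h


theorem pvAGroup_getD (arr : List Int) (v : Int) :
    (pvAGroup arr).getD v [] = (pvIdxs arr).filter (fun i => pvGet arr i == v) := by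
  have key : pvAGroup arr =
      ((pvIdxs arr).map (fun i => (pvGet arr i, i))).foldl
        (fun d p => d.modify p.1 [] (fun x => x ++ [p.2])) PySem.Dict.empty := by
    rw [List.foldl_map]
    rfl
  rw [key, PySem.Dict.getD_foldl_modify_append]
  simp [List.filter_map, List.map_map, Function.comp_def]

theorem pvSetdefault_fold_keys (ps : List (Int × Int)) (d : PySem.Dict Int Int) :
    (ps.foldl (fun d p => d.setdefault p.2 p.1) d).keys =
      PySem.Set.update d.keys (ps.map (·.2)) := by
  induction ps generalizing d with
  | nil => rfl
  | cons p rest ih =>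
    simp only [List.foldl_cons, List.map_cons]
    rw [ih]
    have hkeys : (d.setdefault p.2 p.1).keys = PySem.Set.add d.keys p.2 := by
      rw [PySem.Dict.keys_setdefault]
      unfold PySem.Set.add
      by_cases h : p.2 ∈ d.keys
      · simp [h, PySem.Dict.contains_eq_decide_mem_keys]
      · simp [h, PySem.Dict.contains_eq_decide_mem_keys]
    rw [hkeys]
    rfl

theorem pvBFirst_keys (arr : List Int) : (pvBFirst arr).keys = PySem.Set.ofList arr := by
  have h := pvSetdefault_fold_keys (PySem.List.enumerate arr 0) PySem.Dict.empty
  rw [PySem.List.map_snd_enumerate] at h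
  exact h

theorem pvSetdefault_fold_items (ps : List (Int × Int)) (d : PySem.Dict Int Int)
    (h1 : ps.Pairwise (fun p q => p.1 < q.1))
    (h2 : d.items.Pairwise (fun p q => p.2 < q.2))
    (h3 : ∀ q ∈ d.items, ∀ p ∈ ps, q.2 < p.1) :
    (ps.foldl (fun d p => d.setdefault p.2 p.1) d).items.Pairwise (fun p q => p.2 < q.2) := by
  induction ps generalizing d with
  | nil => exact h2
  | cons p rest ih =>
    simp only [List.foldl_cons]
    apply ih
    · exact h1.tail
    · unfold PySem.Dict.setdefault
      split
      · exact h2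
      · simp only []
        rw [List.pairwise_append]
        refine ⟨h2, by simp, ?_⟩
        intro q hq y hy
        simp at hy
        rw [hy]
        exact h3 q hq p (by simp)
    · intro q hq p' hp'
      unfold PySem.Dict.setdefault at hq
      split at hq
      · exact h3 q hq p' (List.mem_cons_of_mem _ hp')
      · simp only [List.mem_append, List.mem_singleton] at hq
        rcases hq with hq | hq
        · exact h3 q hq p' (List.mem_cons_of_mem _ hp')
        · rw [hq]
          exact (List.pairwise_cons.mp h1).1 p' hp'

theorem pvBFirst_items_pairwise (arr : List Int) :
    (pvBFirst arr).items.Pairwise (fun p q => p.2 < q.2) := by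
  apply pvSetdefault_fold_items
  · exact PySem.List.pairwise_lt_enumerate arr 0
  · simp [PySem.Dict.empty]
  · simp [PySem.Dict.empty]

theorem pvF_pairwise (arr : List Int) :
    (pvBFirst arr).keys.Pairwise (fun a b => pvF arr a < pvF arr b) := by
  have hnd : (pvBFirst arr).keys.Nodup := by
    rw [pvBFirst_keys]; exact PySem.Set.nodup_ofList arr
  have hit := pvBFirst_items_pairwise arr
  have hk : (pvBFirst arr).keys = (pvBFirst arr).items.map Prod.fst := rfl
  rw [hk, List.pairwise_map]
  refine hit.imp_of_mem ?_
  intro p q hp hq hlt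
  have hgp : pvF arr p.1 = p.2 := by
    unfold pvF
    exact PySem.Dict.getD_of_mem_items _ (by rcases p with ⟨a,b⟩; exact hp) hnd 0
  have hgq : pvF arr q.1 = q.2 := by
    unfold pvF
    exact PySem.Dict.getD_of_mem_items _ (by rcases q with ⟨a,b⟩; exact hq) hnd 0
  rw [hgp, hgq]; exact hlt

theorem pvInsertBy_lex (k g : Int → Int) (x : Int) (ys : List Int)
    (h1 : ys.Pairwise (fun a b => toLex (k a, g a) < toLex (k b, g b)))
    (h2 : ∀ y ∈ ys, g y < g x) :
    (PySem.List.insertBy (fun a b => decide (k a < k b)) x ys).Perm (x :: ys) ∧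
    (PySem.List.insertBy (fun a b => decide (k a < k b)) x ys).Pairwise
      (fun a b => toLex (k a, g a) < toLex (k b, g b)) := by
  induction ys with
  | nil => simp [PySem.List.insertBy]
  | cons y t ih =>
    rw [List.pairwise_cons] at h1
    obtain ⟨hy, ht⟩ := h1
    by_cases hk : k x < k y
    · constructor
      · simp [PySem.List.insertBy, hk]
      · simp only [PySem.List.insertBy, hk, decide_true, if_pos]
        rw [List.pairwise_cons]
        refine ⟨?_, List.pairwise_cons.mpr ⟨hy, ht⟩⟩
        intro b hb
        rcases List.mem_cons.mp hb with hb | hb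
        · subst hb
          exact Prod.Lex.toLex_lt_toLex.mpr (Or.inl hk)
        · have := hy b hb
          rcases Prod.Lex.toLex_lt_toLex.mp this with h | ⟨he, _⟩
          · exact Prod.Lex.toLex_lt_toLex.mpr (Or.inl (lt_trans hk h))
          · exact Prod.Lex.toLex_lt_toLex.mpr (Or.inl (he ▸ hk))
    · have ihr := ih ht (fun y hy => h2 y (List.mem_cons_of_mem _ hy))
      constructor
      · simp only [PySem.List.insertBy, hk, decide_false, if_neg, Bool.false_eq_true,
          not_false_iff]
        exact (List.Perm.cons y ihr.1).trans (List.Perm.swap x y t)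
      · simp only [PySem.List.insertBy, hk, decide_false, if_neg, Bool.false_eq_true,
          not_false_iff]
        rw [List.pairwise_cons]
        refine ⟨?_, ihr.2⟩
        intro b hb
        have hb' := (ihr.1.mem_iff).mp hb
        rcases List.mem_cons.mp hb' with hb' | hb'
        · subst hb'
          rcases lt_or_eq_of_le (not_lt.mp hk) with h | h
          · exact Prod.Lex.toLex_lt_toLex.mpr (Or.inl h)
          · exact Prod.Lex.toLex_lt_toLex.mpr (Or.inr ⟨h, h2 y (List.mem_cons_self)⟩)
        · exact hy b hb'

theorem pvSorted_stable (k g : Int → Int) (xs : List Int)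
    (hg : xs.Pairwise (fun a b => g a < g b)) :
    (PySem.List.sorted xs k false).Pairwise
      (fun a b => toLex (k a, g a) < toLex (k b, g b)) := by
  rw [PySem.List.sorted_eq_foldl_insertBy]
  suffices h : ∀ (xs : List Int), xs.Pairwise (fun a b => g a < g b) →
      (xs.foldl (fun acc x => PySem.List.insertBy (fun a b => decide (k a < k b)) x acc) []).Perm xs ∧
      (xs.foldl (fun acc x => PySem.List.insertBy (fun a b => decide (k a < k b)) x acc) []).Pairwise
        (fun a b => toLex (k a, g a) < toLex (k b, g b)) by
    exact (h xs hg).2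
  intro xs
  induction xs using List.reverseRecOn with
  | nil => simp
  | append_singleton t x ih =>
    intro hg'
    rw [List.pairwise_append] at hg'
    obtain ⟨hgt, _, hcross⟩ := hg'
    obtain ⟨ihp, ihw⟩ := ih hgt
    rw [List.foldl_append, List.foldl_cons, List.foldl_nil]
    have h2 : ∀ y ∈ t.foldl (fun acc x => PySem.List.insertBy (fun a b => decide (k a < k b)) x acc) [], g y < g x := by
      intro y hy
      exact hcross y (ihp.mem_iff.mp hy) x (by simp)
    obtain ⟨hp, hw⟩ := pvInsertBy_lex k g x _ ihw h2
    have : (x :: t).Perm (t ++ [x]) := (List.perm_append_singleton x t).symm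
    exact ⟨hp.trans ((List.Perm.cons x ihp).trans this), hw⟩

theorem pvSorted2_eq_sorted_lex {α κ₁ κ₂ : Type} [LinearOrder κ₁] [LinearOrder κ₂]
    (xs : List α) (k1 : α → κ₁) (k2 : α → κ₂) :
    PySem.List.sorted2 xs k1 k2 false =
      PySem.List.sorted xs (fun x => toLex (k1 x, k2 x)) false := by
  have hfun : (fun (a b : α) => decide (k1 a < k1 b) || (!decide (k1 b < k1 a) && decide (k2 a < k2 b)))
      = fun a b => decide (toLex (k1 a, k2 a) < toLex (k1 b, k2 b)) := by
    funext a b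
    rcases lt_trichotomy (k1 a) (k1 b) with h | h | h
    · simp [h, Prod.Lex.toLex_lt_toLex]
    · simp [h, Prod.Lex.toLex_lt_toLex]
    · simp [h, not_lt_of_gt h, Prod.Lex.toLex_lt_toLex, ne_of_gt h]
  simp only [PySem.List.sorted2, PySem.List.sorted]
  rw [hfun]
  simp

theorem pvAZero_zero (l : List Int) (a : List Int) : pvAZero l (a, 0) = (a, 0) := by
  cases l <;> simp [pvAZero]

theorem pvAZero_append (l1 l2 : List Int) (st : List Int × Int) :
    pvAZero (l1 ++ l2) st = pvAZero l2 (pvAZero l1 st) := by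
  induction l1 generalizing st with
  | nil => simp [pvAZero]
  | cons i rest ih =>
    obtain ⟨a, n⟩ := st
    by_cases h : n = 0
    · subst h; simp [pvAZero, pvAZero_zero]
    · simp [pvAZero, h, ih]

theorem pvFoldl_pvAZero (l : List Int) (g : Int → List Int) (st : List Int × Int) :
    l.foldl (fun st v => pvAZero (g v) st) st = pvAZero (l.flatMap g) st := by
  induction l generalizing st with
  | nil => simp [pvAZero]
  | cons v rest ih => simp [List.flatMap_cons, pvAZero_append, ih]

theorem pvAZero_eq_pvBZero (l : List Int) (a : List Int) (n : Int) :
    (pvAZero l (a, n)).1 = pvBZero l a n := by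
  induction l generalizing a n with
  | nil => simp [pvAZero, pvBZero]
  | cons i rest ih =>
    by_cases h : n = 0 <;> simp [pvAZero, pvBZero, h, ih]





-- sorted keys pairwise in (abs, F) lex order
theorem pvKeysSorted_pairwise (arr : List Int) :
    (PySem.List.sorted (pvAGroup arr).keys (fun x => |x|) false).Pairwise
      (fun a b => toLex ((|a| : Int), pvF arr a) < toLex ((|b| : Int), pvF arr b)) := by
  apply pvSorted_stable
  rw [pvAGroup_keys, ← pvBFirst_keys]
  exact pvF_pairwise arr

theorem pvMem_keysSorted (arr : List Int) (v : Int) :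
    v ∈ PySem.List.sorted (pvAGroup arr).keys (fun x => |x|) false ↔ v ∈ arr := by
  rw [PySem.List.mem_sorted, pvAGroup_keys, PySem.Set.mem_ofList]

theorem pvYs_perm (arr : List Int) : (pvYs arr).Perm (pvIdxs arr) := by
  have hnodup : (pvYs arr).Nodup := by
    unfold pvYs
    rw [List.flatMap_def, List.nodup_flatten]
    constructor
    · intro l hl
      simp only [List.mem_map] at hl
      obtain ⟨v, _, rfl⟩ := hl
      exact (PySem.List.nodup_pyRange_one 0 (arr.length : Int)).filter _
    · rw [List.pairwise_map]
      refine (pvKeysSorted_pairwise arr).imp_of_mem ?_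
      intro a b _ _ hab
      have hne : a ≠ b := by
        intro h; subst h; exact lt_irrefl _ hab
      intro i hia hib
      simp only [List.mem_filter, beq_iff_eq] at hia hib
      exact hne (hia.2 ▸ hib.2)
  refine (List.perm_ext_iff_of_nodup hnodup (PySem.List.nodup_pyRange_one _ _)).mpr ?_
  intro i
  unfold pvYs
  rw [List.mem_flatMap]
  constructor
  · rintro ⟨v, _, hi⟩
    exact (List.mem_filter.mp hi).1
  · intro hi
    refine ⟨pvGet arr i, ?_, ?_⟩
    · rw [pvMem_keysSorted]
      have hmem : pvGet arr i ∈ (pvIdxs arr).map (pvGet arr) := List.mem_map_of_mem hi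
      rwa [pvGet_map] at hmem
    · exact List.mem_filter.mpr ⟨hi, by simp⟩

theorem pvYs_pairwise (arr : List Int) :
    (pvYs arr).Pairwise (fun i j =>
      toLex ((|pvGet arr i| : Int), toLex (pvF arr (pvGet arr i), i)) <
      toLex ((|pvGet arr j| : Int), toLex (pvF arr (pvGet arr j), j))) := by
  unfold pvYs
  rw [List.flatMap_def, List.pairwise_flatten]
  constructor
  · intro l hl
    simp only [List.mem_map] at hl
    obtain ⟨v, _, rfl⟩ := hl
    have hpw : ((pvIdxs arr).filter (fun i => pvGet arr i == v)).Pairwise (· < ·) :=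
      (PySem.List.pairwise_lt_pyRange_one 0 (arr.length : Int)).filter _
    refine hpw.imp_of_mem ?_
    intro i j hi hj hij
    simp only [List.mem_filter, beq_iff_eq] at hi hj
    apply Prod.Lex.toLex_lt_toLex.mpr
    right
    refine ⟨by rw [hi.2, hj.2], ?_⟩
    apply Prod.Lex.toLex_lt_toLex.mpr
    right
    exact ⟨by rw [hi.2, hj.2], hij⟩
  · rw [List.pairwise_map]
    refine (pvKeysSorted_pairwise arr).imp_of_mem ?_
    intro a b _ _ hab i hia j hjb
    simp only [List.mem_filter, beq_iff_eq] at hia hjb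
    rw [hia.2, hjb.2]
    rcases Prod.Lex.toLex_lt_toLex.mp hab with h | ⟨he, h2⟩
    · exact Prod.Lex.toLex_lt_toLex.mpr (Or.inl h)
    · exact Prod.Lex.toLex_lt_toLex.mpr (Or.inr ⟨he, Prod.Lex.toLex_lt_toLex.mpr (Or.inl h2)⟩)

theorem pvBOrder_eq (arr : List Int) : pvBOrder arr = pvYs arr := by
  unfold pvBOrder
  rw [pvSorted2_eq_sorted_lex]
  apply PySem.List.sorted_eq_of_perm_of_pairwise_lt
  · exact pvYs_perm arr
  · exact pvYs_pairwise arr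

-- ===== VERDICT (by name: the statement is the Claim_ definition above) =====
theorem eliminate_n_max_spec : Claim_equal_eliminate_n_max := by
  intro arr n _
  show eliminate_n_max arr n = eliminate_n_max_alt arr n
  unfold eliminate_n_max eliminate_n_max_alt
  rw [pvBOrder_eq]
  have hbody : ∀ (st : List Int × Int) (key : Int),
      pvAZero (((pvAGroup arr).get? key).getD []) st =
      pvAZero ((pvIdxs arr).filter (fun i => pvGet arr i == key)) st := by
    intro st key
    rw [← PySem.Dict.getD_eq_get?_getD, pvAGroup_getD]
  simp only [hbody]
  rw [pvFoldl_pvAZero, ← pvYs, pvAZero_eq_pvBZero]
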